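-- pv_equiv track=rewrite | github.com/ahsan-007/Competitive-Programming | Daily Streak/Easy/ShortestDistanceToTargetStringInACircularArray.py | closestTargetV2
-- ===== SOURCE A (Python) =====
-- from typing import List
--
-- def closestTargetV2(words: List[str], target: str, startIndex: int) -> int:
--     minDistance = float("+inf")
--     for i, word in enumerate(words):
--         if word == target:
--             minDistance = min(
--                 minDistance,
--                 abs(i-startIndex),
--                 len(words) - abs((i-startIndex))
--             )
--     return minDistance if minDistance != float("+inf") else -1
-- ===== SOURCE B (Python) =====
-- def closestTargetV2(words, target, startIndex):
--     # Match indices are collected in increasing order; then only the geometry of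
--     # that sorted list matters: the nearest |i-s| is at the element(s) straddling
--     # startIndex, the farthest |i-s| is at one of the two endpoints.
--     idxs = [i for i, w in enumerate(words) if w == target]
--     if not idxs:
--         return -1
--     lo, hi = idxs[0], idxs[-1]
--     if startIndex <= lo:
--         nearest = lo - startIndex
--     elif startIndex >= hi:
--         nearest = startIndex - hi
--     else:
--         j = 0
--         while idxs[j] < startIndex:
--             j += 1
--         nearest = min(startIndex - idxs[j - 1], idxs[j] - startIndex)
--     farthest = max(abs(lo - startIndex), abs(hi - startIndex))
--     return min(nearest, len(words) - farthest)
-- ===== Notes on version B (the rewrite author's own statement) =====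
-- stated objective: alternative
-- what changed: Instead of A's full scan keeping a running min of each match's circular-distance candidates, B collects the (sorted) match indices once and reads the answer off their geometry: the nearest |i-s| is at the element pair straddling startIndex (found by an early-exiting walk) and the farthest |i-s| is at one of the two endpoints.
import Mathlib
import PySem

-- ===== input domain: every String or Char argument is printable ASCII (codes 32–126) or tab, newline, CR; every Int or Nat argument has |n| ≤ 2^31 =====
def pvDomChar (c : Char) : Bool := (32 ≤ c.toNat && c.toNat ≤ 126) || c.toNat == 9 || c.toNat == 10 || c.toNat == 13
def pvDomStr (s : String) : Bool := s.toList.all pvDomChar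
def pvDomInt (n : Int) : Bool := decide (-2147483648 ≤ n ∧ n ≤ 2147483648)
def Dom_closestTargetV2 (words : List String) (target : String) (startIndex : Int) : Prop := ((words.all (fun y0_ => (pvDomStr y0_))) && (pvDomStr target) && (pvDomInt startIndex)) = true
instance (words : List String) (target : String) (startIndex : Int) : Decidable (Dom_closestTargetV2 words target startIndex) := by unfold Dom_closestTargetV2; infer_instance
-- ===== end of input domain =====

-- B replaces A's full-scan running min of per-match circular distances by geometry on the
-- sorted list of match indices: nearest |i-s| at the pair straddling startIndex, farthest
-- at an endpoint; same value on every input (alternative decomposition, not faster).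

-- ===== PORT A =====
-- minDistance : Option Int, none = float("+inf"); the loop is a foldl over enumerate(words).
def closestTargetV2 (words : List String) (target : String) (startIndex : Int) : Int :=
  let st := (PySem.List.enumerate words).foldl
    (fun (md : Option Int) (p : Int × String) =>
      if p.2 == target then
        let x : Int := |p.1 - startIndex|
        let y : Int := (words.length : Int) - |p.1 - startIndex|
        some (match md with
              | none => min x y            -- min(inf, x, y)
              | some m => min (min m x) y) -- min(md, x, y)
      else md) none
  match st with
  | some m => m
  | none => -1

-- ===== PORT B =====
-- Source B's while loop: walk the sorted match indices until the first one ≥ s,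
-- keeping the previous one; j starts at 0 with prev = idxs[0].
def pvWalk (prev s : Int) : List Int → Int
  | [] => s - prev            -- unreachable in B's middle branch (some index ≥ s exists)
  | x :: l => if x < s then pvWalk x s l else min (s - prev) (x - s)

def closestTargetV2_alt (words : List String) (target : String) (startIndex : Int) : Int :=
  let idxs := ((PySem.List.enumerate words).filter (fun p => p.2 == target)).map (fun p => p.1)
  match idxs with
  | [] => -1
  | a :: rest =>
    let hi := rest.getLastD a        -- idxs[-1]
    let nearest :=
      if startIndex ≤ a then a - startIndex
      else if hi ≤ startIndex then startIndex - hi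
      else pvWalk a startIndex rest
    min nearest ((words.length : Int) - max |a - startIndex| |hi - startIndex|)

-- ===== PRECONDITION & SPEC =====
def Spec_closestTargetV2 (words : List String) (target : String) (startIndex : Int) (out : Int) : Prop := out = closestTargetV2_alt words target startIndex
instance (words : List String) (target : String) (startIndex : Int) (out : Int) : Decidable (Spec_closestTargetV2 words target startIndex out) := by unfold Spec_closestTargetV2; infer_instance

-- ===== CLAIM (what is proved, stated in full; the proofs are below) =====
def Claim_equal_closestTargetV2 : Prop := ∀ (words : List String) (target : String) (startIndex : Int), Dom_closestTargetV2 words target startIndex → Spec_closestTargetV2 words target startIndex (closestTargetV2 words target startIndex)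

-- ===== LEMMAS AND PROOFS =====

-- A's step function, specialised to an offset value a (n = len(words)).
def pvStep (n : Int) (md : Option Int) (a : Int) : Option Int :=
  some (match md with
        | none => min a (n - a)
        | some m => min (min m a) (n - a))

-- Fold of A's step over a nonempty offset list = min/max of the offsets, combined.
theorem pvStep_fold (n : Int) (rest : List Int) : ∀ (p q : Int),
    rest.foldl (pvStep n) (some (min p (n - q)))
      = some (min (rest.foldl min p) (n - rest.foldl max q)) := by
  induction rest with
  | nil => intro p q; rfl
  | cons x rest ih =>
    intro p q
    have h : pvStep n (some (min p (n - q))) x = some (min (min p x) (n - max q x)) := by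
      simp only [pvStep, Option.some.injEq]
      omega
    simp only [List.foldl_cons, h]
    exact ih (min p x) (max q x)

-- A's loop body, seen as pvStep on the offset (a case split, definitional on both sides).
theorem pvStepA_eq (n : Int) (target : String) (startIndex : Int)
    (st : Option Int) (p : Int × String) :
    (if p.2 == target then
        let x : Int := |p.1 - startIndex|
        let y : Int := n - |p.1 - startIndex|
        some (match st with
              | none => min x y
              | some m => min (min m x) y)
      else st)
      = (if p.2 == target then pvStep n st |p.1 - startIndex| else st) := by
  by_cases h : p.2 == target
  · cases st <;> simp [h, pvStep]
  · simp [h]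

-- A's fold over enumerate(words) = fold of pvStep over the offsets of the matches.
theorem pvFold_filter (n : Int) (target : String) (startIndex : Int)
    (ps : List (Int × String)) : ∀ (st : Option Int),
    ps.foldl
      (fun (md : Option Int) (p : Int × String) =>
        if p.2 == target then
          let x : Int := |p.1 - startIndex|
          let y : Int := n - |p.1 - startIndex|
          some (match md with
                | none => min x y
                | some m => min (min m x) y)
        else md) st
      = ((ps.filter (fun p => p.2 == target)).map
          (fun p => |p.1 - startIndex|)).foldl (pvStep n) st := by
  induction ps with
  | nil => intro st; rfl
  | cons p ps ih =>
    intro st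
    rw [List.foldl_cons, pvStepA_eq]
    by_cases h : p.2 == target
    · simp only [List.filter_cons, h, if_pos, List.map_cons, List.foldl_cons]
      exact ih _
    · simp only [List.filter_cons, h, Bool.false_eq_true, if_false]
      exact ih st


-- |x - s| resolved by the sign of x - s (omega does not see through abs)
theorem pvAbs_le {x s : Int} (h : x ≤ s) : |x - s| = s - x := by
  rw [abs_of_nonpos (by omega)]; omega

theorem pvAbs_ge {x s : Int} (h : s ≤ x) : |x - s| = x - s := by
  rw [abs_of_nonneg (by omega)]

-- foldl min stays at acc when acc is a lower bound
theorem pvFoldMin_acc (l : List Int) : ∀ (acc : Int), (∀ y ∈ l, acc ≤ y) → l.foldl min acc = acc := by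
  induction l with
  | nil => intro acc _; rfl
  | cons x l ih =>
    intro acc h
    have hx : acc ≤ x := h x (by simp)
    rw [List.foldl_cons, min_eq_left hx]
    exact ih acc (fun y hy => h y (by simp [hy]))

-- foldl min is bounded below by any common lower bound
theorem pvFoldMin_lb (l : List Int) : ∀ (acc b : Int), b ≤ acc → (∀ y ∈ l, b ≤ y) → b ≤ l.foldl min acc := by
  induction l with
  | nil => intro acc b h _; exact h
  | cons x l ih =>
    intro acc b h hl
    rw [List.foldl_cons]
    exact ih _ b (le_min h (hl x (by simp))) (fun y hy => hl y (by simp [hy]))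

-- foldl min is ≤ acc and ≤ every element
theorem pvFoldMin_le_acc (l : List Int) : ∀ (acc : Int), l.foldl min acc ≤ acc := by
  induction l with
  | nil => intro acc; exact le_refl _
  | cons x l ih =>
    intro acc
    rw [List.foldl_cons]
    exact le_trans (ih _) (min_le_left _ _)

theorem pvFoldMin_le_mem (l : List Int) : ∀ (acc y : Int), y ∈ l → l.foldl min acc ≤ y := by
  induction l with
  | nil => intro _ _ h; cases h
  | cons x l ih =>
    intro acc y hy
    rw [List.foldl_cons]
    rcases List.mem_cons.1 hy with h | h
    · subst h
      exact le_trans (pvFoldMin_le_acc l _) (min_le_right _ _)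
    · exact ih _ y h

-- duals for max
theorem pvFoldMax_ub (l : List Int) : ∀ (acc c : Int), acc ≤ c → (∀ y ∈ l, y ≤ c) → l.foldl max acc ≤ c := by
  induction l with
  | nil => intro acc c h _; exact h
  | cons x l ih =>
    intro acc c h hl
    rw [List.foldl_cons]
    exact ih _ c (max_le h (hl x (by simp))) (fun y hy => hl y (by simp [hy]))

theorem pvFoldMax_ge_acc (l : List Int) : ∀ (acc : Int), acc ≤ l.foldl max acc := by
  induction l with
  | nil => intro acc; exact le_refl _
  | cons x l ih =>
    intro acc
    rw [List.foldl_cons]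
    exact le_trans (le_max_left _ _) (ih _)

theorem pvFoldMax_ge_mem (l : List Int) : ∀ (acc y : Int), y ∈ l → y ≤ l.foldl max acc := by
  induction l with
  | nil => intro _ _ h; cases h
  | cons x l ih =>
    intro acc y hy
    rw [List.foldl_cons]
    rcases List.mem_cons.1 hy with h | h
    · subst h
      exact le_trans (le_max_right _ _) (pvFoldMax_ge_acc l _)
    · exact ih _ y h

-- getLastD of a nonempty list is an element of it
theorem pvGetLastD_cons_mem (x : Int) (l : List Int) (d : Int) : (x :: l).getLastD d ∈ x :: l := by
  induction l generalizing x d with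
  | nil => simp [List.getLastD]
  | cons y l ih =>
    have := ih y x
    simp only [List.getLastD_cons] at *
    exact List.mem_cons_of_mem _ this

-- in a sorted list with lower bound d, every element of d :: l is ≤ l.getLastD d
theorem pvLast_ub (l : List Int) : ∀ (d : Int), l.Pairwise (· < ·) → (∀ x ∈ l, d ≤ x) →
    ∀ x ∈ d :: l, x ≤ l.getLastD d := by
  induction l with
  | nil =>
    intro d _ _ x hx
    rcases List.mem_cons.1 hx with h | h
    · subst h; simp [List.getLastD]
    · cases h
  | cons z l ih =>
    intro d hp hd x hx
    have hp' := (List.pairwise_cons.1 hp).2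
    have hz : ∀ y ∈ l, z ≤ y := fun y hy => le_of_lt ((List.pairwise_cons.1 hp).1 y hy)
    have ihz := ih z hp' hz
    rw [List.getLastD_cons]
    rcases List.mem_cons.1 hx with h | h
    · subst h
      have := ihz z (by simp)
      have hdz : x ≤ z := hd z (by simp)
      omega
    · exact ihz x h

-- the walk computes foldl min of |·-s| over the tail, given a straddle exists
theorem pvWalk_eq (s : Int) (rest : List Int) : ∀ (prev : Int),
    (prev :: rest).Pairwise (· < ·) → prev < s → (∃ x ∈ rest, s ≤ x) →
    (rest.map (fun i => |i - s|)).foldl min (s - prev) = pvWalk prev s rest := by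
  induction rest with
  | nil => intro prev _ _ hex; rcases hex with ⟨x, hx, _⟩; cases hx
  | cons x rest ih =>
    intro prev hp hprev hex
    have hpx : prev < x := (List.pairwise_cons.1 hp).1 x (by simp)
    have hp' : (x :: rest).Pairwise (· < ·) := (List.pairwise_cons.1 hp).2
    by_cases hx : x < s
    · have h1 : min (s - prev) |x - s| = s - x := by
        have e : |x - s| = s - x := pvAbs_le (le_of_lt hx)
        omega
      have hex' : ∃ y ∈ rest, s ≤ y := by
        rcases hex with ⟨y, hy, hsy⟩
        rcases List.mem_cons.1 hy with h | h
        · omega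
        · exact ⟨y, h, hsy⟩
      simp only [List.map_cons, List.foldl_cons, h1, pvWalk, if_pos hx]
      exact ih x hp' hx hex'
    · have hxs : s ≤ x := by omega
      have h1 : |x - s| = x - s := pvAbs_ge hxs
      simp only [List.map_cons, List.foldl_cons, pvWalk, if_neg hx, h1]
      apply pvFoldMin_acc
      intro y hy
      rcases List.mem_map.1 hy with ⟨i, hi, rfl⟩
      have hxi : x < i := (List.pairwise_cons.1 hp').1 i hi
      have e : |i - s| = i - s := pvAbs_ge (by omega)
      omega

-- sortedness of B's idxs list
theorem pvIdxs_sorted (words : List String) (target : String) :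
    (((PySem.List.enumerate words).filter (fun p => p.2 == target)).map (fun p => p.1)).Pairwise (· < ·) := by
  have h := (PySem.List.pairwise_lt_enumerate words 0).filter (fun p => p.2 == target)
  exact h.map _ (fun a b hab => hab)

-- the main branch analysis: for a sorted nonempty index list, A's min/max combination
-- equals B's geometric expression
theorem pvBranches (n s a : Int) (rest : List Int)
    (hp : (a :: rest).Pairwise (· < ·)) :
    min ((rest.map (fun i => |i - s|)).foldl min |a - s|)
        (n - (rest.map (fun i => |i - s|)).foldl max |a - s|)
      = min (if s ≤ a then a - s
             else if rest.getLastD a ≤ s then s - rest.getLastD a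
             else pvWalk a s rest)
            (n - max |a - s| |(rest.getLastD a) - s|) := by
  have hp' := (List.pairwise_cons.1 hp).2
  have hlt := (List.pairwise_cons.1 hp).1
  set hi := rest.getLastD a with hhi
  have hhi_mem : hi ∈ a :: rest := by
    cases rest with
    | nil => simp [hhi, List.getLastD]
    | cons z l' => exact List.mem_cons_of_mem _ (pvGetLastD_cons_mem z l' a)
  have hub := pvLast_ub rest a hp' (fun x hx => le_of_lt (hlt x hx))
  have hahi : a ≤ hi := hub a (by simp)
  have hle_hi : ∀ x ∈ rest, x ≤ hi := fun x hx => hub x (List.mem_cons_of_mem _ hx)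
  -- max part
  have hmax : (rest.map (fun i => |i - s|)).foldl max |a - s| = max |a - s| |hi - s| := by
    apply le_antisymm
    · apply pvFoldMax_ub
      · exact le_max_left _ _
      · intro y hy
        rcases List.mem_map.1 hy with ⟨i, hi', rfl⟩
        have h1 : a < i := hlt i hi'
        have h2 : i ≤ hi := hle_hi i hi'
        -- |i - s| ≤ max |a - s| |hi - s| when a ≤ i ≤ hi
        by_cases h : s ≤ i
        · have e1 : |i - s| = i - s := pvAbs_ge h
          have e2 : |hi - s| = hi - s := pvAbs_ge (by omega)
          omega
        · have e1 : |i - s| = s - i := pvAbs_le (by omega)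
          have e2 : |a - s| = s - a := pvAbs_le (by omega)
          omega
    · apply max_le
      · exact pvFoldMax_ge_acc _ _
      · rcases List.mem_cons.1 hhi_mem with h | h
        · rw [h]; exact pvFoldMax_ge_acc _ _
        · exact pvFoldMax_ge_mem _ _ _ (List.mem_map.2 ⟨hi, h, rfl⟩)
  rw [hmax]
  -- min part
  congr 1
  by_cases h1 : s ≤ a
  · rw [if_pos h1]
    have ha : |a - s| = a - s := pvAbs_ge h1
    rw [ha]
    apply pvFoldMin_acc
    intro y hy
    rcases List.mem_map.1 hy with ⟨i, hi', rfl⟩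
    have hai := hlt i hi'
    have e : |i - s| = i - s := pvAbs_ge (by omega)
    omega
  · rw [if_neg h1]
    by_cases h2 : hi ≤ s
    · rw [if_pos h2]
      apply le_antisymm
      · rcases List.mem_cons.1 hhi_mem with h | h
        · have e : |a - s| = s - a := pvAbs_le (by omega)
          have e2 : |a - s| = s - hi := by omega
          rw [← e2]; exact pvFoldMin_le_acc _ _
        · have e : |hi - s| = s - hi := pvAbs_le h2
          rw [← e]
          exact pvFoldMin_le_mem _ _ _ (List.mem_map.2 ⟨hi, h, rfl⟩)
      · apply pvFoldMin_lb
        · have e : |a - s| = s - a := pvAbs_le (by omega)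
          omega
        · intro y hy
          rcases List.mem_map.1 hy with ⟨i, hi', rfl⟩
          have h3 := hle_hi i hi'
          have h4 := hlt i hi'
          have e : |i - s| = s - i := pvAbs_le (by omega)
          omega
    · rw [if_neg h2]
      have ha : |a - s| = s - a := pvAbs_le (by omega)
      rw [ha]
      apply pvWalk_eq s rest a hp (by omega)
      refine ⟨hi, ?_, by omega⟩
      rcases List.mem_cons.1 hhi_mem with h | h
      · exfalso; omega
      · exact h

-- ===== VERDICT (by name: the statement is the Claim_ definition above) =====
theorem closestTargetV2_spec : Claim_equal_closestTargetV2 := by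
  intro words target startIndex _
  unfold Spec_closestTargetV2 closestTargetV2 closestTargetV2_alt
  rw [pvFold_filter]
  have hmm : ((PySem.List.enumerate words).filter (fun p => p.2 == target)).map
      (fun p => |p.1 - startIndex|)
      = ((((PySem.List.enumerate words).filter (fun p => p.2 == target)).map
          (fun p => p.1)).map (fun i => |i - startIndex|)) := by
    rw [List.map_map]; rfl
  rw [hmm]
  have hsorted := pvIdxs_sorted words target
  cases hm : ((PySem.List.enumerate words).filter (fun p => p.2 == target)).map (fun p => p.1) with
  | nil => simp
  | cons a rest =>
    rw [hm] at hsorted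
    have h0 : pvStep (words.length : Int) none |a - startIndex|
        = some (min |a - startIndex| ((words.length : Int) - |a - startIndex|)) := rfl
    simp only [List.map_cons, List.foldl_cons, h0, pvStep_fold]
    exact pvBranches (words.length : Int) startIndex a rest hsorted
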